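-- pv_equiv track=rewrite | github.com/16520124/IR_project | Doan/Project/dataSet.py | create_table_b
-- ===== SOURCE A (Python) =====
-- wh = [',', '[', ']', "'", '"', '-', '(', ')', ':', '“', '”']
--
-- end = ['.', ';', '!', '...', '?']
--
-- def create_table_b(pair_words):
--     table_b = dict()
--     for pair in pair_words:
--         word, type = pair.popitem()
--         if type in wh or type in end:
--             continue
--         if type in table_b.keys():
--             if word in table_b[type].keys():
--                 table_b[type].update(
--                     {word: table_b[type][word] + 1})
--             else:
--                 table_b[type][word] = 1
--         else:
--             table_b[type] = dict()
--             table_b[type][word] = 1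
--     return table_b
-- ===== SOURCE B (Python) =====
-- wh = [',', '[', ']', "'", '"', '-', '(', ')', ':', '“', '”']
--
-- end = ['.', ';', '!', '...', '?']
--
--
-- def create_table_b(pair_words):
--     # Phase 1: group words by type (raw word lists, no counting yet).
--     groups = {}
--     for pair in pair_words:
--         word, type = pair.popitem()
--         if type in wh or type in end:
--             continue
--         groups.setdefault(type, []).append(word)
--     # Phase 2: turn each word list into a count dict (first-appearance order).
--     return {type: {w: words.count(w) for w in dict.fromkeys(words)}
--             for type, words in groups.items()}
-- ===== Notes on version B (the rewrite author's own statement) =====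
-- stated objective: alternative
-- what changed: A counts incrementally inside one loop with nested dict branching; B first groups raw words per type, then builds each count dict in a separate counting phase over the grouped lists.
import Mathlib
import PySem

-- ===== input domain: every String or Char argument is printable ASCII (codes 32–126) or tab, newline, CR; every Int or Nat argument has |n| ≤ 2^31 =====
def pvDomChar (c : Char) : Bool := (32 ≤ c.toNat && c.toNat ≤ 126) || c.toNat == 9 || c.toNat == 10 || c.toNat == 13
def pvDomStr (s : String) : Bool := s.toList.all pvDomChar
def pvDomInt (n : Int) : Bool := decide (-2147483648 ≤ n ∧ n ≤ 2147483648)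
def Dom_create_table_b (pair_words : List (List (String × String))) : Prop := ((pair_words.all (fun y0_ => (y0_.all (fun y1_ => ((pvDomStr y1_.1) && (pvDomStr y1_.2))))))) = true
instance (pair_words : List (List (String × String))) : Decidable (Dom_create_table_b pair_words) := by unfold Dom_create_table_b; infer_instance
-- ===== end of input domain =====

-- B replaces A's single incremental-counting loop by a grouping pass (type -> raw word list)
-- followed by a separate counting pass per group; same return value (equivalence is about the
-- RETURN value: both Pythons pop each inner dict in place, as A does).

-- ===== PORT A =====
def pvWh : List String := [",", "[", "]", "'", "\"", "-", "(", ")", ":", "“", "”"]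
def pvEnd : List String := [".", ";", "!", "...", "?"]

-- one iteration of A's loop; pair.popitem() = last item of the dict (Pre_ gives nonempty, nodup keys)
def pvStepA (tb : PySem.Dict String (PySem.Dict String Int)) (pair : List (String × String)) :
    PySem.Dict String (PySem.Dict String Int) :=
  match pair.getLast? with
  | none => tb
  | some (word, ty) =>
    if ty ∈ pvWh ∨ ty ∈ pvEnd then tb
    else
      match tb.get? ty with
      | some inner =>
        match inner.get? word with
        | some c => tb.insert ty (inner.insert word (c + 1))
        | none   => tb.insert ty (inner.insert word 1)
      | none => tb.insert ty (PySem.Dict.empty.insert word 1)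

def create_table_b (pair_words : List (List (String × String))) : List (String × List (String × Int)) :=
  ((pair_words.foldl pvStepA PySem.Dict.empty).items).map (fun p => (p.1, p.2.items))

-- ===== PORT B =====
-- one iteration of B's grouping loop; groups.setdefault(type, []).append(word) mutates the
-- list held at type in place: modelled exactly by Dict.modify type [] (· ++ [word])
def pvStepB (g : PySem.Dict String (List String)) (pair : List (String × String)) :
    PySem.Dict String (List String) :=
  match pair.getLast? with
  | none => g
  | some (word, ty) =>
    if ty ∈ pvWh ∨ ty ∈ pvEnd then g
    else g.modify ty [] (· ++ [word])

def create_table_b_alt (pair_words : List (List (String × String))) : List (String × List (String × Int)) :=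
  ((pair_words.foldl pvStepB PySem.Dict.empty).items).map
    (fun p => (p.1, (PySem.List.dedup p.2).map (fun w => (w, (p.2.count w : Int)))))

-- ===== PRECONDITION & SPEC =====
-- Pre_ excludes inner lists that are empty (A's pair.popitem() raises KeyError there) and inner
-- lists with duplicate keys (a Python dict cannot hold them: the assoc list then does not
-- represent the dict A receives, whose popitem order after collapsing duplicates is accidental).
def Pre_create_table_b (pair_words : List (List (String × String))) : Prop :=
  ∀ p ∈ pair_words, p ≠ [] ∧ (p.map Prod.fst).Nodup
instance (pair_words : List (List (String × String))) : Decidable (Pre_create_table_b pair_words) := by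
  unfold Pre_create_table_b; infer_instance

def pvWitness_create_table_b : (List (List (String × String))) :=
  [[("run", "V"), ("dog", "N")], [("run", "V")], [("the", ",")]]

def Spec_create_table_b (pair_words : List (List (String × String))) (out : List (String × List (String × Int))) : Prop := out = create_table_b_alt pair_words
instance (pair_words : List (List (String × String))) (out : List (String × List (String × Int))) : Decidable (Spec_create_table_b pair_words out) := by unfold Spec_create_table_b; infer_instance

-- ===== CLAIM (what is proved, stated in full; the proofs are below) =====
def Claim_equal_create_table_b : Prop := ∀ (pair_words : List (List (String × String))), Dom_create_table_b pair_words → Pre_create_table_b pair_words → Spec_create_table_b pair_words (create_table_b pair_words)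

-- ===== LEMMAS AND PROOFS =====

-- map a function over the values of a dict, keeping keys and order
def pvMapVal {κ ν ν' : Type} [BEq κ] (f : ν → ν') (d : PySem.Dict κ ν) : PySem.Dict κ ν' :=
  PySem.Dict.mk (d.items.map (fun p => (p.1, f p.2)))

theorem pvGet?_mapVal {κ ν ν' : Type} [BEq κ] (f : ν → ν') (d : PySem.Dict κ ν) (k : κ) :
    (pvMapVal f d).get? k = (d.get? k).map f := by
  simp [pvMapVal, PySem.Dict.get?, List.find?_map, Function.comp_def, Option.map_map]

theorem pvContains_mapVal {κ ν ν' : Type} [BEq κ] (f : ν → ν') (d : PySem.Dict κ ν) (k : κ) :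
    (pvMapVal f d).contains k = d.contains k := by
  rw [PySem.Dict.contains_eq_isSome_get?, PySem.Dict.contains_eq_isSome_get?, pvGet?_mapVal]
  cases d.get? k <;> rfl

theorem pvInsert_mapVal {κ ν ν' : Type} [BEq κ] (f : ν → ν') (d : PySem.Dict κ ν) (k : κ) (v : ν) :
    pvMapVal f (d.insert k v) = (pvMapVal f d).insert k (f v) := by
  have hc := pvContains_mapVal f d k
  apply PySem.Dict.ext
  simp only [pvMapVal] at hc ⊢
  rw [PySem.Dict.items_insert, PySem.Dict.items_insert, hc]
  by_cases h : d.contains k = true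
  · simp only [h, if_pos, List.map_map]
    apply List.map_congr_left
    intro p _
    by_cases hk : (p.1 == k) = true <;> simp [hk]
  · simp [h]

theorem pvStep_comm (g : PySem.Dict String (List String)) (pair : List (String × String)) :
    pvStepA (pvMapVal PySem.Dict.counter g) pair = pvMapVal PySem.Dict.counter (pvStepB g pair) := by
  unfold pvStepA pvStepB
  cases hl : pair.getLast? with
  | none => rfl
  | some wt =>
    obtain ⟨word, ty⟩ := wt
    by_cases hf : ty ∈ pvWh ∨ ty ∈ pvEnd
    · simp [hf]
    · simp only [hf, if_neg, not_false_iff]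
      rw [PySem.Dict.modify, pvInsert_mapVal, PySem.Dict.counter_append_singleton,
        PySem.Dict.modify, pvGet?_mapVal]
      cases hg : g.get? ty with
      | none =>
        have : g.getD ty [] = [] := by
          rw [PySem.Dict.getD_eq_get?_getD, hg]; rfl
        simp only [Option.map_none, this]
        have : (PySem.Dict.counter ([] : List String)).insert word
            ((PySem.Dict.counter ([] : List String)).getD word 0 + 1)
            = PySem.Dict.empty.insert word 1 := by
          rfl
        rw [this]
      | some ws =>
        have hws : g.getD ty [] = ws := by
          rw [PySem.Dict.getD_eq_get?_getD, hg]; rfl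
        simp only [Option.map_some, hws]
        cases hw : (PySem.Dict.counter ws).get? word with
        | none =>
          have : (PySem.Dict.counter ws).getD word 0 = 0 := by
            rw [PySem.Dict.getD_eq_get?_getD, hw]; rfl
          rw [this, zero_add]
        | some c =>
          have : (PySem.Dict.counter ws).getD word 0 = c := by
            rw [PySem.Dict.getD_eq_get?_getD, hw]; rfl
          rw [this]

theorem pvFold_comm (pws : List (List (String × String))) (g : PySem.Dict String (List String)) :
    pws.foldl pvStepA (pvMapVal PySem.Dict.counter g) = pvMapVal PySem.Dict.counter (pws.foldl pvStepB g) := by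
  induction pws generalizing g with
  | nil => rfl
  | cons p rest ih => simp only [List.foldl_cons, pvStep_comm, ih]

-- ===== VERDICT (by name: the statement is the Claim_ definition above) =====
theorem create_table_b_spec : Claim_equal_create_table_b := by
  intro pws _ _
  unfold Spec_create_table_b create_table_b create_table_b_alt
  have h0 : (PySem.Dict.empty : PySem.Dict String (PySem.Dict String Int))
      = pvMapVal PySem.Dict.counter PySem.Dict.empty := rfl
  rw [h0, pvFold_comm]
  generalize (pws.foldl pvStepB PySem.Dict.empty) = G
  simp only [pvMapVal, List.map_map]
  apply List.map_congr_left
  intro p _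
  simp [PySem.Dict.items_counter, PySem.List.dedup]
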